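-- pv_equiv track=rewrite | github.com/MikolekN/User-Behavior-Driven-Interface | backend/routes/transfer_blueprint.py | accumulate_tranactions_income_and_outcome
-- ===== SOURCE A (Python) =====
-- def accumulate_tranactions_income_and_outcome(transfers: dict) -> dict[str, any]:
--     accumulated_groups = {}
--
--     for t in transfers:
--         date = t['created']
--         if date not in accumulated_groups:
--             accumulated_groups[date] = {
--                 'income': 0,
--                 'outcome': 0
--             }
--         if t.get('income', False):
--             accumulated_groups[date]['income'] += t['amount']
--         else:
--             accumulated_groups[date]['outcome'] += t['amount']
--
--     return accumulated_groups
-- ===== SOURCE B (Python) =====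
-- def accumulate_tranactions_income_and_outcome(transfers: dict) -> dict[str, any]:
--     groups = {}
--     for t in transfers:
--         groups.setdefault(t['created'], []).append(t)
--     return {
--         date: {
--             'income': sum(t['amount'] for t in ts if t.get('income', False)),
--             'outcome': sum(t['amount'] for t in ts if not t.get('income', False)),
--         }
--         for date, ts in groups.items()
--     }
-- ===== Notes on version B (the rewrite author's own statement) =====
-- stated objective: alternative
-- what changed: A keeps one running {'income','outcome'} pair per date updated inside a single loop; B first groups the transfers into a date->list index in one pass and then computes each date's totals with two sum-over-filter comprehensions.
import Mathlib
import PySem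

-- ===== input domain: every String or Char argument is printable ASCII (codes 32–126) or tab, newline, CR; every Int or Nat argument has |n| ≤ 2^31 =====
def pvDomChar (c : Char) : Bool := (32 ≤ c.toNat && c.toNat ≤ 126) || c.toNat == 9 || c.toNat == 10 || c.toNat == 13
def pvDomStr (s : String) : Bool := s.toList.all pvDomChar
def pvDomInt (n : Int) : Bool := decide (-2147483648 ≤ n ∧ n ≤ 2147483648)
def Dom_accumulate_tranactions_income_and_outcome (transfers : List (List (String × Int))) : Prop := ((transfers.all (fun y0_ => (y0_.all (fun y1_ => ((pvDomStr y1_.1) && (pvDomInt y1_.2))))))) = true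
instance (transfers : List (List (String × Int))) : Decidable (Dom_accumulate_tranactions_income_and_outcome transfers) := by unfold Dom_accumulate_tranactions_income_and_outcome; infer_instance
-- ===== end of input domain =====

-- B groups the transfers by date in one pass and then sums each group with two comprehensions,
-- instead of A's single loop that updates a running income/outcome pair per date (objective: alternative decomposition).

-- ===== PORT A =====
-- one loop step of A: init the date's group if new, then += on 'income' or 'outcome'
-- (Python's `+=` on the inner dict entry is ported as insert of getD + amount; keys exist by construction)
def pvStepA (acc : PySem.Dict Int (PySem.Dict String Int)) (t : List (String × Int)) :
    PySem.Dict Int (PySem.Dict String Int) :=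
  let date := (PySem.Dict.mk t).getD "created" 0   -- t['created']; Pre_ guarantees the key (getD totalizes the KeyError)
  let acc1 := if acc.contains date then acc
              else acc.insert date (PySem.Dict.mk [("income", 0), ("outcome", 0)])
  let g := acc1.getD date PySem.Dict.empty
  if (PySem.Dict.mk t).getD "income" 0 ≠ 0 then     -- t.get('income', False) truthy
    acc1.insert date (g.insert "income" (g.getD "income" 0 + (PySem.Dict.mk t).getD "amount" 0))
  else
    acc1.insert date (g.insert "outcome" (g.getD "outcome" 0 + (PySem.Dict.mk t).getD "amount" 0))

def accumulate_tranactions_income_and_outcome (transfers : List (List (String × Int))) :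
    List (Int × List (String × Int)) :=
  ((transfers.foldl pvStepA PySem.Dict.empty).items).map (fun p => (p.1, p.2.items))

-- ===== PORT B =====
-- one loop step of B: groups.setdefault(t['created'], []).append(t)
def pvStepB (groups : PySem.Dict Int (List (List (String × Int)))) (t : List (String × Int)) :
    PySem.Dict Int (List (List (String × Int))) :=
  groups.insert ((PySem.Dict.mk t).getD "created" 0)
    (groups.getD ((PySem.Dict.mk t).getD "created" 0) [] ++ [t])

def accumulate_tranactions_income_and_outcome_alt (transfers : List (List (String × Int))) :
    List (Int × List (String × Int)) :=
  let groups := transfers.foldl pvStepB PySem.Dict.empty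
  groups.items.map (fun p =>
    (p.1, [("income", ((p.2.filter (fun t => (PySem.Dict.mk t).getD "income" 0 != 0)).map
                        (fun t => (PySem.Dict.mk t).getD "amount" 0)).sum),
           ("outcome", ((p.2.filter (fun t => (PySem.Dict.mk t).getD "income" 0 == 0)).map
                        (fun t => (PySem.Dict.mk t).getD "amount" 0)).sum)]))

-- ===== PRECONDITION & SPEC =====
-- A raises KeyError when a transfer lacks 'created' or 'amount'; exactly those inputs are excluded.
def Pre_accumulate_tranactions_income_and_outcome (transfers : List (List (String × Int))) : Prop :=
  ∀ t ∈ transfers, (PySem.Dict.mk t).contains "created" = true ∧ (PySem.Dict.mk t).contains "amount" = true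
instance (transfers : List (List (String × Int))) : Decidable (Pre_accumulate_tranactions_income_and_outcome transfers) := by unfold Pre_accumulate_tranactions_income_and_outcome; infer_instance

def pvWitness_accumulate_tranactions_income_and_outcome : (List (List (String × Int))) :=
  [[("created", 1), ("amount", 5), ("income", 1)], [("created", 1), ("amount", 2)], [("created", 3), ("amount", 4), ("income", 0)]]

def Spec_accumulate_tranactions_income_and_outcome (transfers : List (List (String × Int))) (out : List (Int × List (String × Int))) : Prop := out = accumulate_tranactions_income_and_outcome_alt transfers
instance (transfers : List (List (String × Int))) (out : List (Int × List (String × Int))) : Decidable (Spec_accumulate_tranactions_income_and_outcome transfers out) := by unfold Spec_accumulate_tranactions_income_and_outcome; infer_instance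

-- ===== CLAIM (what is proved, stated in full; the proofs are below) =====
def Claim_equal_accumulate_tranactions_income_and_outcome : Prop := ∀ (transfers : List (List (String × Int))), Dom_accumulate_tranactions_income_and_outcome transfers → Pre_accumulate_tranactions_income_and_outcome transfers → Spec_accumulate_tranactions_income_and_outcome transfers (accumulate_tranactions_income_and_outcome transfers)

-- ===== LEMMAS AND PROOFS =====

-- summary of a group of transfers: the inner dict A maintains for that date
def pvSumm (ts : List (List (String × Int))) : PySem.Dict String Int :=
  PySem.Dict.mk [("income", ((ts.filter (fun t => (PySem.Dict.mk t).getD "income" 0 != 0)).map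
                        (fun t => (PySem.Dict.mk t).getD "amount" 0)).sum),
                 ("outcome", ((ts.filter (fun t => (PySem.Dict.mk t).getD "income" 0 == 0)).map
                        (fun t => (PySem.Dict.mk t).getD "amount" 0)).sum)]

-- the loop invariant: A's accumulator is the pointwise summary of B's group index
def pvRel (acc : PySem.Dict Int (PySem.Dict String Int)) (idx : PySem.Dict Int (List (List (String × Int)))) : Prop :=
  acc.items = idx.items.map (fun p => (p.1, pvSumm p.2)) ∧ idx.keys.Nodup

lemma pvInsIncome (x y v : Int) :
    (PySem.Dict.mk [("income",x),("outcome",y)]).insert "income" v = PySem.Dict.mk [("income",v),("outcome",y)] := by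
  apply PySem.Dict.ext
  rw [PySem.Dict.items_insert_of_contains _ _ (by simp [pysem])]
  simp

lemma pvInsOutcome (x y v : Int) :
    (PySem.Dict.mk [("income",x),("outcome",y)]).insert "outcome" v = PySem.Dict.mk [("income",x),("outcome",v)] := by
  apply PySem.Dict.ext
  rw [PySem.Dict.items_insert_of_contains _ _ (by simp [pysem])]
  simp

lemma pvGetIncome (x y : Int) : (PySem.Dict.mk [("income",x),("outcome",y)]).getD "income" 0 = x := by
  simp [pysem, PySem.Dict.getD_eq_get?_getD, PySem.Dict.get?_mk_cons]

lemma pvGetOutcome (x y : Int) : (PySem.Dict.mk [("income",x),("outcome",y)]).getD "outcome" 0 = y := by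
  simp [pysem, PySem.Dict.getD_eq_get?_getD, PySem.Dict.get?_mk_cons]

lemma pvSumm_append_inc (ts : List (List (String × Int))) (t : List (String × Int))
    (h : ((PySem.Dict.mk t).getD "income" 0 != 0) = true) :
    pvSumm (ts ++ [t]) = PySem.Dict.mk
      [("income", ((ts.filter (fun t => (PySem.Dict.mk t).getD "income" 0 != 0)).map
                        (fun t => (PySem.Dict.mk t).getD "amount" 0)).sum + (PySem.Dict.mk t).getD "amount" 0),
       ("outcome", ((ts.filter (fun t => (PySem.Dict.mk t).getD "income" 0 == 0)).map
                        (fun t => (PySem.Dict.mk t).getD "amount" 0)).sum)] := by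
  have h2 : ((PySem.Dict.mk t).getD "income" 0 == 0) = false := by
    simpa using h
  simp [pvSumm, List.filter_append, h, h2]

lemma pvSumm_append_out (ts : List (List (String × Int))) (t : List (String × Int))
    (h : ((PySem.Dict.mk t).getD "income" 0 != 0) = false) :
    pvSumm (ts ++ [t]) = PySem.Dict.mk
      [("income", ((ts.filter (fun t => (PySem.Dict.mk t).getD "income" 0 != 0)).map
                        (fun t => (PySem.Dict.mk t).getD "amount" 0)).sum),
       ("outcome", ((ts.filter (fun t => (PySem.Dict.mk t).getD "income" 0 == 0)).map
                        (fun t => (PySem.Dict.mk t).getD "amount" 0)).sum + (PySem.Dict.mk t).getD "amount" 0)] := by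
  have h2 : ((PySem.Dict.mk t).getD "income" 0 == 0) = true := by
    simpa using h
  simp [pvSumm, List.filter_append, h, h2]

lemma pvRel_step (acc : PySem.Dict Int (PySem.Dict String Int)) (idx : PySem.Dict Int (List (List (String × Int))))
    (t : List (String × Int)) (h : pvRel acc idx) : pvRel (pvStepA acc t) (pvStepB idx t) := by
  obtain ⟨hitems, hnodup⟩ := h
  have hkeys : acc.keys = idx.keys := by
    simp only [PySem.Dict.keys, hitems, List.map_map]
    rfl
  have hnodupA : acc.keys.Nodup := by rw [hkeys]; exact hnodup
  have hcont : ∀ j : Int, acc.contains j = idx.contains j := by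
    intro j
    rw [PySem.Dict.contains_eq_decide_mem_keys, PySem.Dict.contains_eq_decide_mem_keys, hkeys]
  have hgetD : ∀ (j : Int) (ts : List (List (String × Int))), idx.get? j = some ts →
      acc.getD j PySem.Dict.empty = pvSumm ts := by
    intro j ts hget
    have hmem : (j, ts) ∈ idx.items := PySem.Dict.mem_items_of_get?_eq_some _ hget
    have hmemA : (j, pvSumm ts) ∈ acc.items := by
      rw [hitems]
      exact List.mem_map_of_mem hmem
    exact PySem.Dict.getD_of_mem_items _ hmemA hnodupA _
  constructor
  · -- items relation
    simp only [pvStepA, pvStepB]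
    cases hc : idx.contains ((PySem.Dict.mk t).getD "created" 0) with
    | true =>
      -- the date is already present on both sides
      have hcA : acc.contains ((PySem.Dict.mk t).getD "created" 0) = true := by
        rw [hcont]; exact hc
      obtain ⟨ts, hts⟩ : ∃ ts, idx.get? ((PySem.Dict.mk t).getD "created" 0) = some ts := by
        have := PySem.Dict.contains_eq_isSome_get? idx ((PySem.Dict.mk t).getD "created" 0)
        rw [hc] at this
        exact Option.isSome_iff_exists.mp this.symm
      have hgB : idx.getD ((PySem.Dict.mk t).getD "created" 0) [] = ts :=
        PySem.Dict.getD_of_get?_eq_some _ _ hts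
      have hgA : acc.getD ((PySem.Dict.mk t).getD "created" 0) PySem.Dict.empty = pvSumm ts :=
        hgetD _ _ hts
      rw [PySem.Dict.items_insert_of_contains _ _ hc]
      simp only [hcA, if_true, hgA, hgB]
      rw [pvSumm]
      cases hinc : ((PySem.Dict.mk t).getD "income" 0 != 0) with
      | true =>
        rw [if_pos (by simpa using hinc)]
        rw [PySem.Dict.items_insert_of_contains _ _ hcA, hitems, List.map_map, List.map_map]
        apply List.map_congr_left
        intro p hp
        by_cases hpk : p.1 = ((PySem.Dict.mk t).getD "created" 0)
        · simp [Function.comp, hpk, pvGetIncome, pvInsIncome, pvSumm_append_inc ts t hinc]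
        · simp [Function.comp, hpk]
      | false =>
        rw [if_neg (by simpa using hinc)]
        rw [PySem.Dict.items_insert_of_contains _ _ hcA, hitems, List.map_map, List.map_map]
        apply List.map_congr_left
        intro p hp
        by_cases hpk : p.1 = ((PySem.Dict.mk t).getD "created" 0)
        · simp [Function.comp, hpk, pvGetOutcome, pvInsOutcome, pvSumm_append_out ts t hinc]
        · simp [Function.comp, hpk]
    | false =>
      -- a fresh date: both sides append a new entry
      have hcA : acc.contains ((PySem.Dict.mk t).getD "created" 0) = false := by
        rw [hcont]; exact hc
      have hgB : idx.getD ((PySem.Dict.mk t).getD "created" 0) [] = [] :=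
        PySem.Dict.getD_of_not_contains _ _ hc
      rw [PySem.Dict.items_insert_of_not_contains _ _ hc]
      simp only [hcA, if_false, Bool.false_eq_true, PySem.Dict.getD_insert_self, hgB,
        List.nil_append]
      simp only [PySem.Dict.insert_insert_self]
      cases hinc : ((PySem.Dict.mk t).getD "income" 0 != 0) with
      | true =>
        rw [if_pos (by simpa using hinc)]
        rw [PySem.Dict.items_insert_of_not_contains _ _ hcA, hitems, List.map_append]
        congr 1
        have h2 : ((PySem.Dict.mk t).getD "income" 0 == 0) = false := by simpa using hinc
        simp [pvGetIncome, pvInsIncome, pvSumm, h2, hinc]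
      | false =>
        rw [if_neg (by simpa using hinc)]
        rw [PySem.Dict.items_insert_of_not_contains _ _ hcA, hitems, List.map_append]
        congr 1
        have h2 : ((PySem.Dict.mk t).getD "income" 0 == 0) = true := by simpa using hinc
        simp [pvGetOutcome, pvInsOutcome, pvSumm, h2, hinc]
  · -- keys of the group index stay Nodup
    exact PySem.Dict.nodup_keys_insert _ _ _ hnodup

lemma pvRel_foldl (l : List (List (String × Int))) :
    ∀ acc idx, pvRel acc idx → pvRel (l.foldl pvStepA acc) (l.foldl pvStepB idx) := by
  induction l with
  | nil => intro acc idx h; exact h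
  | cons t l ih => intro acc idx h; exact ih _ _ (pvRel_step acc idx t h)

-- ===== VERDICT (by name: the statement is the Claim_ definition above) =====
theorem accumulate_tranactions_income_and_outcome_spec : Claim_equal_accumulate_tranactions_income_and_outcome := by
  intro transfers _ _
  have h := pvRel_foldl transfers PySem.Dict.empty PySem.Dict.empty
    (⟨rfl, by simp [pysem]⟩)
  unfold Spec_accumulate_tranactions_income_and_outcome
  unfold accumulate_tranactions_income_and_outcome accumulate_tranactions_income_and_outcome_alt
  rw [h.1]
  simp only [List.map_map]
  apply List.map_congr_left
  intro p hp
  simp [Function.comp, pvSumm]
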